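-- pv_equiv track=rewrite | github.com/MihirRajak91/SDS-RAG | src/sds_rag/utils/validation_utils.py | validate_table_data
-- ===== SOURCE A (Python) =====
-- from typing import List, Dict, Any, Optional, Union, Tuple
--
-- def validate_table_data(table_data: List[List[str]]) -> Tuple[bool, List[str]]:
--     """
--     Validate table data structure.
--
--     Args:
--         table_data: Table data to validate
--
--     Returns:
--         Tuple[bool, List[str]]: (is_valid, list_of_errors)
--     """
--     errors = []
--
--     if not table_data:
--         errors.append("Table data is empty")
--         return False, errors
--
--     if not isinstance(table_data, list):
--         errors.append("Table data must be a list")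
--         return False, errors
--
--     # Check if all rows are lists
--     for i, row in enumerate(table_data):
--         if not isinstance(row, list):
--             errors.append(f"Row {i} is not a list")
--
--     # Check for consistent row lengths (allow some variance)
--     if len(table_data) > 1:
--         row_lengths = [len(row) for row in table_data]
--         min_length, max_length = min(row_lengths), max(row_lengths)
--
--         if max_length - min_length > 2:  # Allow some variance for merged cells
--             errors.append(f"Inconsistent row lengths: min={min_length}, max={max_length}")
--
--     # Check for completely empty table
--     has_content = False
--     for row in table_data:
--         for cell in row:
--             if cell and str(cell).strip():
--                 has_content = True
--                 break
--         if has_content: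
--             break
--
--     if not has_content:
--         errors.append("Table contains no content")
--
--     return len(errors) == 0, errors
-- ===== SOURCE B (Python) =====
-- def validate_table_data(table_data):
--     """Single-pass rewrite: one loop maintains running min/max row length and
--     a has-content flag, instead of three separate scans."""
--     if not table_data:
--         return False, ["Table data is empty"]
--     errors = []
--     min_len = max_len = len(table_data[0])
--     has_content = False
--     for row in table_data:
--         n = len(row)
--         if n < min_len:
--             min_len = n
--         if n > max_len:
--             max_len = n
--         if not has_content:
--             for cell in row:
--                 if cell and cell.strip():
--                     has_content = True
--                     break
--     if len(table_data) > 1 and max_len - min_len > 2: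
--         errors.append(f"Inconsistent row lengths: min={min_len}, max={max_len}")
--     if not has_content:
--         errors.append("Table contains no content")
--     return len(errors) == 0, errors
-- ===== Notes on version B (the rewrite author's own statement) =====
-- stated objective: alternative
-- what changed: The three separate scans of A (per-row isinstance loop, row-length comprehension plus min/max, nested content loop) become one single pass that maintains running min/max row lengths and a has-content flag.
import Mathlib
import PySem

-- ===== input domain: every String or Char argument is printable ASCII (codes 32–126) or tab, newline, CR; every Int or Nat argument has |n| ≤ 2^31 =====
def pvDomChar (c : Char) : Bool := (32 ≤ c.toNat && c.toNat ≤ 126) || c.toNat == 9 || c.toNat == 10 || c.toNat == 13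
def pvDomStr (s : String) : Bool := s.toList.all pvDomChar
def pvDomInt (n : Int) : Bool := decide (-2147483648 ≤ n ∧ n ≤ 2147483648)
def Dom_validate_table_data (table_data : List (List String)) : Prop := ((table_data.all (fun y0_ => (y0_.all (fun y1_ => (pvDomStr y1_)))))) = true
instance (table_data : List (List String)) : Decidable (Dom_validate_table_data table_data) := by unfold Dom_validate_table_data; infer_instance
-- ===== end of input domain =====

-- B rewrites A's three separate scans as one pass with running min/max lengths and a
-- has-content flag (objective: alternative decomposition; same asymptotic cost).

-- ===== PORT A =====
-- `cell and str(cell).strip()` used as a condition: truthy iff cell nonempty and strip nonempty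
def pvCellTruthy (cell : String) : Bool :=
  decide (cell ≠ "") && decide (PySem.Str.strip cell ≠ "")

def validate_table_data (table_data : List (List String)) : Bool × List String :=
  if table_data = [] then (false, ["Table data is empty"])
  else
    -- isinstance(table_data, list) is always true under the type convention, and so is
    -- isinstance(row, list) for every row: the enumerate loop appends nothing.
    let errors : List String :=
      (PySem.List.enumerate table_data).foldl (fun acc _ => acc) []
    let errors :=
      if table_data.length > 1 then
        let row_lengths := table_data.map List.length
        match PySem.List.min? row_lengths (fun x => x), PySem.List.max? row_lengths (fun x => x) with
        | some min_length, some max_length =>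
          if max_length - min_length > 2 then
            errors ++ ["Inconsistent row lengths: min=" ++ PySem.Int.toStr (min_length : Int) ++
                       ", max=" ++ PySem.Int.toStr (max_length : Int)]
          else errors
        | _, _ => errors  -- unreachable: row_lengths nonempty
      else errors
    -- nested content loop with break
    let has_content := table_data.foldl
      (fun hc row => if hc then hc
        else row.foldl (fun h cell => if h then h else pvCellTruthy cell) false) false
    let errors := if !has_content then errors ++ ["Table contains no content"] else errors
    (errors.length == 0, errors)

-- ===== PORT B =====
def pvRowHasContent (row : List String) : Bool :=
  row.any (fun cell => decide (cell ≠ "") && decide (PySem.Str.strip cell ≠ ""))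

-- single pass: (min_len, max_len, has_content)
def pvScan (table_data : List (List String)) (st : Nat × Nat × Bool) : Nat × Nat × Bool :=
  table_data.foldl (fun s row =>
    ((if row.length < s.1 then row.length else s.1),
     (if row.length > s.2.1 then row.length else s.2.1),
     (if s.2.2 then true else pvRowHasContent row))) st

def validate_table_data_alt (table_data : List (List String)) : Bool × List String :=
  match table_data with
  | [] => (false, ["Table data is empty"])
  | r0 :: _ =>
    let st := pvScan table_data (r0.length, r0.length, false)
    let errors : List String :=
      (if decide (table_data.length > 1) && decide (st.2.1 - st.1 > 2) then
        ["Inconsistent row lengths: min=" ++ PySem.Int.toStr (st.1 : Int) ++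
         ", max=" ++ PySem.Int.toStr (st.2.1 : Int)]
      else []) ++
      (if st.2.2 then [] else ["Table contains no content"])
    (errors.length == 0, errors)

-- ===== PRECONDITION & SPEC =====
def Spec_validate_table_data (table_data : List (List String)) (out : Bool × List String) : Prop := out = validate_table_data_alt table_data
instance (table_data : List (List String)) (out : Bool × List String) : Decidable (Spec_validate_table_data table_data out) := by unfold Spec_validate_table_data; infer_instance

-- ===== CLAIM (what is proved, stated in full; the proofs are below) =====
def Claim_equal_validate_table_data : Prop := ∀ (table_data : List (List String)), Dom_validate_table_data table_data → Spec_validate_table_data table_data (validate_table_data table_data)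

-- ===== LEMMAS AND PROOFS =====

theorem foldl_const {α β : Type} (l : List α) (b : β) :
    l.foldl (fun acc _ => acc) b = b := by
  induction l generalizing b with
  | nil => rfl
  | cons x t ih => exact ih b

theorem inner_fold_any (row : List String) (b : Bool) :
    row.foldl (fun h cell => if h then h else pvCellTruthy cell) b
      = (b || pvRowHasContent row) := by
  induction row generalizing b with
  | nil => simp [pvRowHasContent]
  | cons c t ih =>
    simp only [List.foldl, pvRowHasContent, List.any_cons]
    rw [ih]
    cases b <;> simp [pvRowHasContent, pvCellTruthy]

theorem scan_split (td : List (List String)) (a b : Nat) (c : Bool) :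
    pvScan td (a, b, c) =
      (td.foldl (fun m r => if r.length < m then r.length else m) a,
       td.foldl (fun m r => if r.length > m then r.length else m) b,
       td.foldl (fun h r => if h then h else pvRowHasContent r) c) := by
  induction td generalizing a b c with
  | nil => rfl
  | cons r t ih =>
    have h := ih (if r.length < a then r.length else a)
                 (if r.length > b then r.length else b)
                 (if c then true else pvRowHasContent r)
    simp only [pvScan, List.foldl] at h ⊢
    rw [h]
    cases c <;> rfl

theorem fold_min_eq (td : List (List String)) (a : Nat) :
    td.foldl (fun m r => if r.length < m then r.length else m) a
      = (td.map List.length).foldl min a := by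
  induction td generalizing a with
  | nil => rfl
  | cons r t ih =>
    simp only [List.map_cons, List.foldl]
    rw [ih]
    congr 1
    simp only [Nat.min_def]
    split_ifs <;> omega

theorem fold_max_eq (td : List (List String)) (a : Nat) :
    td.foldl (fun m r => if r.length > m then r.length else m) a
      = (td.map List.length).foldl max a := by
  induction td generalizing a with
  | nil => rfl
  | cons r t ih =>
    simp only [List.map_cons, List.foldl]
    rw [ih]
    congr 1
    simp only [Nat.max_def]
    split_ifs <;> omega

theorem outer_fold_eq (td : List (List String)) (c : Bool) :
    td.foldl (fun hc row => if hc then hc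
        else row.foldl (fun h cell => if h then h else pvCellTruthy cell) false) c
      = td.foldl (fun h r => if h then h else pvRowHasContent r) c := by
  induction td generalizing c with
  | nil => rfl
  | cons r t ih =>
    simp only [List.foldl, inner_fold_any, Bool.false_or, ih]

-- ===== VERDICT (by name: the statement is the Claim_ definition above) =====
theorem validate_table_data_spec : Claim_equal_validate_table_data := by
  intro td _
  unfold Spec_validate_table_data
  match td with
  | [] => rfl
  | r0 :: rest =>
    unfold validate_table_data validate_table_data_alt
    simp only [if_neg (by simp : ¬ (r0 :: rest = [])), foldl_const,
      scan_split, fold_min_eq, fold_max_eq, outer_fold_eq]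
    simp only [List.map_cons]
    rw [PySem.List.min?_id_cons, PySem.List.max?_id_cons]
    simp only [List.foldl, Nat.min_self, Nat.max_self]
    by_cases h1 : (r0 :: rest).length > 1 <;>
    by_cases h2 : (rest.map List.length).foldl max r0.length
                    - (rest.map List.length).foldl min r0.length > 2 <;>
      simp [h1, h2] <;> split_ifs <;> simp_all [List.length_pos_iff]
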